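-- pv_equiv track=rewrite | github.com/MrBrantCode/unitest_baseline | mut_generate/mist_train_cf/cf_92613/solution.py | find_index_of_the
-- ===== SOURCE A (Python) =====
-- def find_index_of_the(sentence):
--     """
--     Finds the index of the string "the" in the decoded sentence.
--
--     Args:
--     sentence (str): The encoded sentence.
--
--     Returns:
--     int: The index of "the" if found, or -1 otherwise.
--     """
--     def caesar_decode(sentence, shift):
--         decoded_sentence = ""
--         for char in sentence:
--             if char.isalpha():
--                 char_code = ord(char.lower()) - shift
--                 if char_code < ord('a'):
--                     char_code += 26
--                 decoded_sentence += chr(char_code)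
--             else:
--                 decoded_sentence += char
--         return decoded_sentence
--
--     index = -1
--     for shift in range(1, 26):
--         decoded_sentence = caesar_decode(sentence, shift)
--         if "the" in decoded_sentence.lower():
--             index = decoded_sentence.lower().index("the")
--             break
--     return index
-- ===== SOURCE B (Python) =====
-- def find_index_of_the(sentence):
--     s = sentence.lower()
--     for shift in range(1, 26):
--         # encode the needle instead of decoding the haystack
--         target = "".join(chr((ord(c) - 97 + shift) % 26 + 97) for c in "the")
--         i = s.find(target)
--         if i >= 0:
--             return i
--     return -1
-- ===== Notes on version B (the rewrite author's own statement) =====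
-- stated objective: faster
-- what changed: Instead of Caesar-decoding the whole sentence for each shift, lowercasing the copy and searching it for the needle, B lowercases the sentence once and, for each shift, encodes the 3-character needle forward and runs a single find on the fixed string.
import Mathlib
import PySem

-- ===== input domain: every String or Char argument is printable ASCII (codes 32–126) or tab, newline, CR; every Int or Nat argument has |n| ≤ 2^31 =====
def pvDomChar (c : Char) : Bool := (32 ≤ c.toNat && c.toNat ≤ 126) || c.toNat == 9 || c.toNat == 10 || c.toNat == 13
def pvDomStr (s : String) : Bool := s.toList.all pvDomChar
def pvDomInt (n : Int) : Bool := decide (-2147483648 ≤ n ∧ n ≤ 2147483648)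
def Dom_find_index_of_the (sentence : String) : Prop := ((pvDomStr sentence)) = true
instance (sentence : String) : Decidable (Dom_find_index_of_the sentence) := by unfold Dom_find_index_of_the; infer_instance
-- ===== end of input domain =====

-- B lowercases the sentence once and, per shift, encodes the 3-char needle and searches the fixed
-- string, instead of Caesar-decoding the whole sentence for every shift (objective: faster).


-- ===== PORT A =====
-- char_code = ord(char.lower()) - shift; if char_code < ord('a'): char_code += 26; chr(char_code)
def pvDecChar (shift : Int) (c : Char) : Char :=
  let code : Int := ((PySem.Chars.lowerChar c).toNat : Int) - shift
  let code : Int := if code < 97 then code + 26 else code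
  Char.ofNat code.toNat

-- the inner helper caesar_decode: builds the decoded list char by char
def pvCaesarDecode (sentence : List Char) (shift : Int) : List Char :=
  sentence.foldl
    (fun acc c =>
      if PySem.Chars.isalpha c then acc ++ [pvDecChar shift c] else acc ++ [c]) []

-- the for-shift loop with break; `.index("the")` is guarded by `"the" in …`, so it equals find there
def pvLoopA (l : List Char) : List Int → Int → Int
  | [], index => index
  | shift :: rest, index =>
    let decoded := pvCaesarDecode l shift
    if PySem.Chars.isIn ['t', 'h', 'e'] (PySem.Chars.lower decoded) then
      PySem.Chars.find (PySem.Chars.lower decoded) ['t', 'h', 'e']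
    else pvLoopA l rest index

def find_index_of_the (sentence : String) : Int :=
  pvLoopA sentence.toList (PySem.List.pyRange 1 26) (-1)

-- ===== PORT B =====
-- chr((ord(c) - 97 + shift) % 26 + 97)
def pvEncChar (shift : Int) (c : Char) : Char :=
  Char.ofNat ((PySem.Int.mod ((c.toNat : Int) - 97 + shift) 26).toNat + 97)

def pvLoopB (s : List Char) : List Int → Int
  | [] => -1
  | shift :: rest =>
    let i := PySem.Chars.find s (List.map (pvEncChar shift) ['t', 'h', 'e'])
    if 0 ≤ i then i else pvLoopB s rest

def find_index_of_the_alt (sentence : String) : Int :=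
  pvLoopB (PySem.Chars.lower sentence.toList) (PySem.List.pyRange 1 26)

-- ===== PRECONDITION & SPEC =====
def Spec_find_index_of_the (sentence : String) (out : Int) : Prop := out = find_index_of_the_alt sentence
instance (sentence : String) (out : Int) : Decidable (Spec_find_index_of_the sentence out) := by unfold Spec_find_index_of_the; infer_instance

-- ===== CLAIM (what is proved, stated in full; the proofs are below) =====
def Claim_equal_find_index_of_the : Prop := ∀ (sentence : String), Dom_find_index_of_the sentence → Spec_find_index_of_the sentence (find_index_of_the sentence)

-- ===== LEMMAS AND PROOFS =====

theorem pvCharEq (a b : Char) : a = b ↔ a.toNat = b.toNat := by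
  rw [Char.ext_iff, ← UInt32.toNat_inj]; rfl

theorem pvToNatOfNat {n : Nat} (h : n ≤ 122) : (Char.ofNat n).toNat = n := by
  rw [Char.toNat_ofNat, if_pos]; left; omega

theorem pvIslowerIff (c : Char) : PySem.Chars.islower c = true ↔ 97 ≤ c.toNat ∧ c.toNat ≤ 122 := by
  unfold PySem.Chars.islower
  rw [Bool.and_eq_true, decide_eq_true_eq, decide_eq_true_eq, Char.le_def, Char.le_def,
    UInt32.le_iff_toNat_le, UInt32.le_iff_toNat_le]
  exact Iff.rfl

theorem pvIsupperIff (c : Char) : PySem.Chars.isupper c = true ↔ 65 ≤ c.toNat ∧ c.toNat ≤ 90 := by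
  unfold PySem.Chars.isupper
  rw [Bool.and_eq_true, decide_eq_true_eq, decide_eq_true_eq, Char.le_def, Char.le_def,
    UInt32.le_iff_toNat_le, UInt32.le_iff_toNat_le]
  exact Iff.rfl

theorem pvLowerCharToNat (c : Char) :
    (PySem.Chars.lowerChar c).toNat = if 65 ≤ c.toNat ∧ c.toNat ≤ 90 then c.toNat + 32 else c.toNat := by
  unfold PySem.Chars.lowerChar
  by_cases h : PySem.Chars.isupper c = true
  · have hb := (pvIsupperIff c).1 h
    rw [if_pos h, if_pos hb, pvToNatOfNat (by omega)]
  · rw [if_neg h, if_neg (fun hb => h ((pvIsupperIff c).2 hb))]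

theorem pvLowerCharOfLower (c : Char) (h : 97 ≤ c.toNat) : PySem.Chars.lowerChar c = c := by
  unfold PySem.Chars.lowerChar
  rw [if_neg]
  intro hu
  have := (pvIsupperIff c).1 hu
  omega

-- dec2: what A's per-character decode becomes on an already-lowercased character
def pvDec2 (shift : Int) (x : Char) : Char :=
  if PySem.Chars.islower x then pvDecChar shift x else x

theorem pvDecCharToNat (shift : Int) (c : Char) (h1 : 1 ≤ shift) (h2 : shift ≤ 25)
    (hc : 97 ≤ c.toNat ∧ c.toNat ≤ 122) :
    ((pvDecChar shift c).toNat : Int) =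
      (if (c.toNat : Int) - shift < 97 then (c.toNat : Int) - shift + 26 else (c.toNat : Int) - shift) := by
  have hb : (c.toNat : Int) ≤ 122 := by exact_mod_cast hc.2
  have ha : (97 : Int) ≤ (c.toNat : Int) := by exact_mod_cast hc.1
  show ((Char.ofNat (if (((PySem.Chars.lowerChar c).toNat : Int) - shift) < 97
      then ((PySem.Chars.lowerChar c).toNat : Int) - shift + 26
      else ((PySem.Chars.lowerChar c).toNat : Int) - shift).toNat).toNat : Int) = _
  rw [pvLowerCharOfLower c hc.1]
  split_ifs with h
  · rw [pvToNatOfNat (n := ((c.toNat : Int) - shift + 26).toNat) (by omega)]; omega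
  · rw [pvToNatOfNat (n := ((c.toNat : Int) - shift).toNat) (by omega)]; omega

theorem pvEncCharToNat (shift : Int) (c : Char) :
    ((pvEncChar shift c).toNat : Int) = ((c.toNat : Int) - 97 + shift) % 26 + 97 := by
  unfold pvEncChar
  have hm : PySem.Int.mod ((c.toNat : Int) - 97 + shift) 26 = ((c.toNat : Int) - 97 + shift) % 26 :=
    PySem.Int.mod_eq_emod_of_pos (by norm_num)
  have hnn : 0 ≤ ((c.toNat : Int) - 97 + shift) % 26 := Int.emod_nonneg _ (by norm_num)
  have hlt : ((c.toNat : Int) - 97 + shift) % 26 < 26 := Int.emod_lt_of_pos _ (by norm_num)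
  rw [pvToNatOfNat (by rw [hm]; omega)]
  rw [hm]; omega

-- the per-character correspondence: dec2 hits p exactly where the original character is enc p
theorem pvPerChar (shift : Int) (c p : Char) (h1 : 1 ≤ shift) (h2 : shift ≤ 25)
    (hp1 : 97 ≤ p.toNat) (hp2 : p.toNat ≤ 122) :
    (pvDec2 shift c = p) ↔ (c = pvEncChar shift p) := by
  rw [pvCharEq, pvCharEq]
  have henc := pvEncCharToNat shift p
  have hpl : (97 : Int) ≤ (p.toNat : Int) := by exact_mod_cast hp1
  have hpu : ((p.toNat : Int)) ≤ 122 := by exact_mod_cast hp2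
  have h26 : 0 ≤ ((p.toNat : Int) - 97 + shift) % 26 := Int.emod_nonneg _ (by norm_num)
  have h26' : ((p.toNat : Int) - 97 + shift) % 26 < 26 := Int.emod_lt_of_pos _ (by norm_num)
  unfold pvDec2
  by_cases hc : PySem.Chars.islower c = true
  · have hcb := (pvIslowerIff c).1 hc
    rw [if_pos hc]
    have hdec := pvDecCharToNat shift c h1 h2 hcb
    have hcl : (97 : Int) ≤ (c.toNat : Int) := by exact_mod_cast hcb.1
    have hcu : ((c.toNat : Int)) ≤ 122 := by exact_mod_cast hcb.2
    constructor
    · intro h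
      have hA : ((pvDecChar shift c).toNat : Int) = (p.toNat : Int) := by exact_mod_cast h
      rw [hdec] at hA
      have : ((c.toNat : Int)) = ((pvEncChar shift p).toNat : Int) := by
        rw [henc]; split_ifs at hA with hs <;> omega
      exact_mod_cast this
    · intro h
      have hcn : ((c.toNat : Int)) = ((p.toNat : Int) - 97 + shift) % 26 + 97 := by
        rw [← henc]; exact_mod_cast h
      have : ((pvDecChar shift c).toNat : Int) = (p.toNat : Int) := by
        rw [hdec]; split_ifs with hs <;> omega
      exact_mod_cast this
  · rw [if_neg hc]
    have hcb : ¬ (97 ≤ c.toNat ∧ c.toNat ≤ 122) := fun hh => hc ((pvIslowerIff c).2 hh)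
    constructor
    · intro h; omega
    · intro h
      have : ((c.toNat : Int)) = ((p.toNat : Int) - 97 + shift) % 26 + 97 := by
        rw [← henc]; exact_mod_cast h
      omega

theorem pvPrefix3 (shift : Int) (h1 : 1 ≤ shift) (h2 : shift ≤ 25) (m : List Char) :
    List.isPrefixOf ['t', 'h', 'e'] (List.map (pvDec2 shift) m) =
      List.isPrefixOf (List.map (pvEncChar shift) ['t', 'h', 'e']) m := by
  have hB : ∀ (p : Char), 97 ≤ p.toNat → p.toNat ≤ 122 →
      ∀ c, (p == pvDec2 shift c) = (pvEncChar shift p == c) := by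
    intro p hp1 hp2 c
    rw [Bool.eq_iff_iff, beq_iff_eq, beq_iff_eq]
    have h := pvPerChar shift c p h1 h2 hp1 hp2
    exact ⟨fun hx => (h.1 hx.symm).symm, fun hx => (h.2 hx.symm).symm⟩
  have ht := hB 't' (by decide) (by decide)
  have hh := hB 'h' (by decide) (by decide)
  have he := hB 'e' (by decide) (by decide)
  match m with
  | [] => simp
  | [a] => simp [List.isPrefixOf, ht a]
  | [a, b] => simp [List.isPrefixOf, ht a, hh b]
  | a :: b :: c :: rest => simp [List.isPrefixOf, ht a, hh b, he c]

theorem pvFindGo (shift : Int) (h1 : 1 ≤ shift) (h2 : shift ≤ 25) :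
    ∀ (m : List Char) (k : Nat),
      PySem.Chars.find.go ['t', 'h', 'e'] (List.map (pvDec2 shift) m) k =
        PySem.Chars.find.go (List.map (pvEncChar shift) ['t', 'h', 'e']) m k := by
  intro m
  induction m with
  | nil => intro k; simp [PySem.Chars.find.go]
  | cons a t ih =>
    intro k
    have hred : ∀ (sub : List Char) (x : Char) (xs : List Char) (k : Nat),
        PySem.Chars.find.go sub (x :: xs) k =
          if sub.isPrefixOf (x :: xs) then (k : Int) else PySem.Chars.find.go sub xs (k + 1) := by
      intro sub x xs k; rfl
    rw [List.map_cons, hred, hred, ← List.map_cons, pvPrefix3 shift h1 h2 (a :: t), ih (k + 1)]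

theorem pvFindEq (shift : Int) (h1 : 1 ≤ shift) (h2 : shift ≤ 25) (m : List Char) :
    PySem.Chars.find (List.map (pvDec2 shift) m) ['t', 'h', 'e'] =
      PySem.Chars.find m (List.map (pvEncChar shift) ['t', 'h', 'e']) := by
  unfold PySem.Chars.find
  exact pvFindGo shift h1 h2 m 0

-- the foldl of caesar_decode is a map
theorem pvCaesarAux (shift : Int) :
    ∀ (l : List Char) (acc : List Char),
      l.foldl (fun acc c => if PySem.Chars.isalpha c then acc ++ [pvDecChar shift c] else acc ++ [c]) acc =
        acc ++ l.map (fun c => if PySem.Chars.isalpha c then pvDecChar shift c else c) := by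
  intro l
  induction l with
  | nil => intro acc; simp
  | cons a t ih =>
    intro acc
    simp only [List.foldl_cons, List.map_cons]
    by_cases h : PySem.Chars.isalpha a = true
    · rw [if_pos h, if_pos h, ih, List.append_assoc]; rfl
    · rw [if_neg h, if_neg h, ih, List.append_assoc]; rfl

-- A's per-character work factors through lowercasing
theorem pvFactor (shift : Int) (c : Char) (h1 : 1 ≤ shift) (h2 : shift ≤ 25) :
    PySem.Chars.lowerChar (if PySem.Chars.isalpha c then pvDecChar shift c else c) =
      pvDec2 shift (PySem.Chars.lowerChar c) := by
  unfold pvDec2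
  by_cases h : PySem.Chars.isalpha c = true
  · rw [if_pos h]
    have hlc : 97 ≤ (PySem.Chars.lowerChar c).toNat ∧ (PySem.Chars.lowerChar c).toNat ≤ 122 := by
      unfold PySem.Chars.isalpha at h
      rcases Bool.or_eq_true_iff.1 h with h' | h'
      · have := (pvIsupperIff c).1 h'
        rw [pvLowerCharToNat]; split_ifs <;> omega
      · have := (pvIslowerIff c).1 h'
        rw [pvLowerCharToNat]; split_ifs <;> omega
    rw [if_pos ((pvIslowerIff _).2 hlc)]
    have hfix : pvDecChar shift (PySem.Chars.lowerChar c) = pvDecChar shift c := by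
      unfold pvDecChar
      rw [pvLowerCharOfLower (PySem.Chars.lowerChar c) hlc.1]
    rw [hfix]
    have hdec : ((pvDecChar shift c).toNat : Int) =
        (if ((PySem.Chars.lowerChar c).toNat : Int) - shift < 97
          then ((PySem.Chars.lowerChar c).toNat : Int) - shift + 26
          else ((PySem.Chars.lowerChar c).toNat : Int) - shift) := by
      rw [← hfix]; exact pvDecCharToNat shift (PySem.Chars.lowerChar c) h1 h2 hlc
    apply pvLowerCharOfLower
    have hll : (97 : Int) ≤ ((PySem.Chars.lowerChar c).toNat : Int) := by exact_mod_cast hlc.1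
    have hlu : (((PySem.Chars.lowerChar c).toNat : Int)) ≤ 122 := by exact_mod_cast hlc.2
    have : (97 : Int) ≤ ((pvDecChar shift c).toNat : Int) := by
      rw [hdec]; split_ifs with hs <;> omega
    exact_mod_cast this
  · have hu : PySem.Chars.isupper c ≠ true := by
      intro hu; exact h (by unfold PySem.Chars.isalpha; rw [hu]; rfl)
    have hl : PySem.Chars.islower c ≠ true := by
      intro hl; exact h (by unfold PySem.Chars.isalpha; rw [hl]; simp)
    have hid : PySem.Chars.lowerChar c = c := by
      unfold PySem.Chars.lowerChar; rw [if_neg hu]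
    rw [if_neg h, hid, if_neg hl]

theorem pvLowerDecode (l : List Char) (shift : Int) (h1 : 1 ≤ shift) (h2 : shift ≤ 25) :
    PySem.Chars.lower (pvCaesarDecode l shift) = List.map (pvDec2 shift) (PySem.Chars.lower l) := by
  unfold pvCaesarDecode PySem.Chars.lower
  rw [pvCaesarAux shift l [], List.nil_append, List.map_map, List.map_map]
  exact List.map_congr_left (fun c _ => pvFactor shift c h1 h2)

theorem pvLoopEq (l : List Char) :
    ∀ (shifts : List Int), (∀ x ∈ shifts, 1 ≤ x ∧ x ≤ 25) →
      pvLoopA l shifts (-1) = pvLoopB (PySem.Chars.lower l) shifts := by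
  intro shifts
  induction shifts with
  | nil => intro _; rfl
  | cons sh rest ih =>
    intro hmem
    have hsh := hmem sh (List.mem_cons_self ..)
    have hfind :
        PySem.Chars.find (PySem.Chars.lower (pvCaesarDecode l sh)) ['t', 'h', 'e'] =
          PySem.Chars.find (PySem.Chars.lower l) (List.map (pvEncChar sh) ['t', 'h', 'e']) := by
      rw [pvLowerDecode l sh hsh.1 hsh.2, pvFindEq sh hsh.1 hsh.2]
    have hge := PySem.Chars.neg_one_le_find (PySem.Chars.lower l) (List.map (pvEncChar sh) ['t', 'h', 'e'])
    show pvLoopA l (sh :: rest) (-1) = pvLoopB (PySem.Chars.lower l) (sh :: rest)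
    simp only [pvLoopA, pvLoopB, PySem.Chars.isIn, hfind]
    by_cases hi : 0 ≤ PySem.Chars.find (PySem.Chars.lower l) (List.map (pvEncChar sh) ['t', 'h', 'e'])
    · rw [if_pos (by simp only [bne_iff_ne, ne_eq]; omega), if_pos hi]
    · rw [if_neg (by simp only [bne_iff_ne, ne_eq, not_not]; omega), if_neg hi]
      exact ih (fun x hx => hmem x (List.mem_cons_of_mem _ hx))

-- ===== VERDICT (by name: the statement is the Claim_ definition above) =====
theorem find_index_of_the_spec : Claim_equal_find_index_of_the := by
  intro sentence _
  unfold Spec_find_index_of_the find_index_of_the find_index_of_the_alt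
  exact pvLoopEq sentence.toList (PySem.List.pyRange 1 26)
    (fun x hx => by
      have := PySem.List.mem_pyRange_one.1 hx
      omega)
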